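-- pv_equiv track=rewrite | github.com/Kuhron/programming | Mapping/PointCodeArithmetic.py | binary_down_one
-- ===== SOURCE A (Python) =====
-- def binary_up_one(bits):
--     # add 1, make overflow 1 if we rolled over to 0, 0 otherwise
--     if all(b == 1 for b in bits):
--         overflow = 1
--         new_bits = [0] * len(bits)
--     else:
--         still_adding = True
--         n = len(bits)
--         new_bits = [None for i in range(n)]
--         for i in range(n):
--             j = -(i+1)
--             b = bits[-(i+1)]
--             if still_adding:
--                 if b == 1:
--                     new_bits[j] = 0
--                     # and we're still adding, carrying the one to the next place
--                 elif b == 0: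
--                     new_bits[j] = 1
--                     still_adding = False
--             else:
--                 new_bits[j] = b
--         assert not still_adding, "should not have overflowed"
--         overflow = 0
--
--     return overflow, new_bits
--
-- def binary_down_one(bits):
--     # subtract 1, make overflow -1 if we rolled down past 0, 0 otherwise
--     if all(b == 0 for b in bits):
--         overflow = -1
--         new_bits = [1] * len(bits)
--     else:
--         overflow, new_bits_flipped = binary_up_one(flip_bits(bits))
--         assert overflow == 0, "should not have overflowed"
--         new_bits = flip_bits(new_bits_flipped)
--     return overflow, new_bits
--
-- def flip_bits(bits):
--     return [1 - b for b in bits]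
-- ===== SOURCE B (Python) =====
-- def binary_down_one(bits):
--     # direct borrow loop from the least-significant bit; builds a fresh list, no mutation of the input.
--     # Bits are only interpreted while the borrow is pending: a non-bit value there is rejected;
--     # once the borrow is consumed the remaining items are copied through untouched.
--     borrowing = True
--     out = []
--     for b in reversed(bits):
--         if borrowing:
--             if b == 1:
--                 out.append(0)
--                 borrowing = False
--             elif b == 0:
--                 out.append(1)
--             else:
--                 raise ValueError("invalid bit: %r" % (b,))
--         else:
--             out.append(b)
--     out.reverse()
--     return (-1 if borrowing else 0), out
-- ===== Notes on version B (the rewrite author's own statement) =====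
-- stated objective: simpler
-- what changed: Replaces the flip -> binary_up_one -> flip pipeline (three passes plus an index-based loop writing into a preallocated None list) with a single direct borrow loop over the reversed bits; where A fails on a non-bit value that the borrow must consume (AssertionError or TypeError), B raises a clear ValueError.
import Mathlib
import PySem

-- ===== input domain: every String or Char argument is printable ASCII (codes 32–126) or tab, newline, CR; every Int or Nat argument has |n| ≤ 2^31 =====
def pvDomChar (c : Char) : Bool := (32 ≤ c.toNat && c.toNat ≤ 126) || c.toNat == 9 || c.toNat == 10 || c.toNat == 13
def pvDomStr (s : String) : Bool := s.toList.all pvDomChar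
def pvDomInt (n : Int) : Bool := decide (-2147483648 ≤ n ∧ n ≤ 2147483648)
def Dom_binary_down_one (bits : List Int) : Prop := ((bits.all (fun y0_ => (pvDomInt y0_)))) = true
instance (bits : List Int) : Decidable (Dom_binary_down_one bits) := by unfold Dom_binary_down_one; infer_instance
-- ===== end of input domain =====

-- B replaces A's flip -> binary_up_one -> flip pipeline by one direct borrow loop over the reversed bits (simpler decomposition, same cost).


-- ===== PORT A =====
def flip_bits (bits : List Int) : List Int := bits.map (fun b => 1 - b)

-- new_bits[j] = v with a Python (possibly negative) index j; the none branch is Python's IndexError (never reached: i < len)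
def pySetOpt (xs : List (Option Int)) (j : Int) (v : Int) : List (Option Int) :=
  match PySem.List.pyIdx? xs.length j with
  | some k => xs.set k (some v)
  | none => xs

-- the body of binary_up_one's for-loop (j = -(i+1); b = bits[-(i+1)])
def upStep (bits : List Int) (st : Bool × List (Option Int)) (i : Int) : Bool × List (Option Int) :=
  let j : Int := -(i+1)
  let b : Int := (PySem.List.pyGet? bits (-(i+1))).getD 0
  if st.1 then
    if b == 1 then (true, pySetOpt st.2 j 0)
    else if b == 0 then (false, pySetOpt st.2 j 1)
    else st
  else (st.1, pySetOpt st.2 j b)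

def binary_up_one (bits : List Int) : Int × List Int :=
  if bits.all (fun b => b == 1) then (1, List.replicate bits.length 0)
  else
    -- new_bits = [None]*n, cells filled in the loop; under Pre_ every cell is filled, .getD 0 is unreachable
    let st := (PySem.List.pyRange 0 (bits.length : Int) 1).foldl (upStep bits)
      (true, List.replicate bits.length none)
    (0, st.2.map (fun o => o.getD 0))

def binary_down_one (bits : List Int) : Int × List Int :=
  if bits.all (fun b => b == 0) then (-1, List.replicate bits.length 1)
  else
    let r := binary_up_one (flip_bits bits)
    (r.1, flip_bits r.2)

-- ===== PORT B =====
-- the body of B's borrow loop; the last borrowing branch is Python's 'raise ValueError' (outside Pre_: st is never used)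
def altStep (st : Bool × List Int) (b : Int) : Bool × List Int :=
  if st.1 then
    if b == 1 then (false, st.2 ++ [0])
    else if b == 0 then (true, st.2 ++ [1])
    else st
  else (false, st.2 ++ [b])

def binary_down_one_alt (bits : List Int) : Int × List Int :=
  let st := bits.reverse.foldl altStep (true, [])
  (if st.1 then -1 else 0, st.2.reverse)

-- ===== PRECONDITION & SPEC =====
-- Pre_ excludes exactly the inputs whose least-significant nonzero element is not 1 (not a 0/1 bit list below
-- the borrow point), on which A raises (AssertionError or TypeError on a leftover None); A returns on all of Pre_.
def Pre_binary_down_one (bits : List Int) : Prop :=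
  ((bits.reverse.dropWhile (fun b => b == 0)).head?.getD 1) = 1
instance (bits : List Int) : Decidable (Pre_binary_down_one bits) := by
  unfold Pre_binary_down_one; infer_instance
def pvWitness_binary_down_one : List Int := [1, 0, 1, 0]
def Spec_binary_down_one (bits : List Int) (out : Int × List Int) : Prop := out = binary_down_one_alt bits
instance (bits : List Int) (out : Int × List Int) : Decidable (Spec_binary_down_one bits out) := by unfold Spec_binary_down_one; infer_instance

-- ===== CLAIM (what is proved, stated in full; the proofs are below) =====
def Claim_equal_binary_down_one : Prop := ∀ (bits : List Int), Dom_binary_down_one bits → Pre_binary_down_one bits → Spec_binary_down_one bits (binary_down_one bits)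

-- ===== LEMMAS AND PROOFS =====

-- the borrow pass, LSB-first (proof-side model of B's loop)
def run : Bool → List Int → Bool × List Int
  | a, [] => (a, [])
  | a, b :: rs =>
    if a then
      if b = 1 then ((run false rs).1, 0 :: (run false rs).2)
      else if b = 0 then ((run true rs).1, 1 :: (run true rs).2)
      else run true rs
    else ((run false rs).1, b :: (run false rs).2)

-- the add pass of binary_up_one, LSB-first, with none for the cells the Python loop leaves as None
def runA : Bool → List Int → Bool × List (Option Int)
  | a, [] => (a, [])
  | a, b :: rs =>
    if a then
      if b = 1 then ((runA true rs).1, some 0 :: (runA true rs).2)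
      else if b = 0 then ((runA false rs).1, some 1 :: (runA false rs).2)
      else ((runA true rs).1, none :: (runA true rs).2)
    else ((runA false rs).1, some b :: (runA false rs).2)

lemma alt_foldl (rs : List Int) : ∀ (a : Bool) (acc : List Int),
    rs.foldl altStep (a, acc) = ((run a rs).1, acc ++ (run a rs).2) := by
  induction rs with
  | nil => intro a acc; simp [run]
  | cons b rs ih =>
    intro a acc
    rw [List.foldl_cons]
    by_cases ha : a
    · by_cases hb : b = 1
      · rw [show altStep (a, acc) b = (false, acc ++ [0]) by simp [altStep, ha, hb], ih]
        simp [run, ha, hb]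
      · by_cases hb0 : b = 0
        · rw [show altStep (a, acc) b = (true, acc ++ [1]) by simp [altStep, ha, hb0], ih]
          simp [run, ha, hb0]
        · rw [show altStep (a, acc) b = (a, acc) by simp [altStep, ha, hb, hb0], ih]
          simp [run, ha, hb, hb0]
    · rw [show altStep (a, acc) b = (false, acc ++ [b]) by simp [altStep, ha], ih]
      simp [run, ha]

lemma alt_eq (bits : List Int) :
    binary_down_one_alt bits
      = (if (run true bits.reverse).1 then -1 else 0, (run true bits.reverse).2.reverse) := by
  unfold binary_down_one_alt
  rw [alt_foldl]
  simp

lemma set_replicate_cons (d : Nat) (x v : Option Int) (t : List (Option Int)) :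
    (List.replicate (d+1) x ++ t).set d v = List.replicate d x ++ v :: t := by
  induction d with
  | zero => simp
  | succ d ih => simpa [List.replicate_succ] using ih

lemma pyGet?_neg (xs : List Int) (k : Nat) (hk : k < xs.length) :
    PySem.List.pyGet? xs (-((k : Int)+1)) = xs.reverse[k]? := by
  have h1 : PySem.List.pyIdx? xs.length (-((k : Int)+1)) = some (xs.length - 1 - k) := by
    simp only [PySem.List.pyIdx?]
    rw [if_neg (by omega), if_pos (by exact_mod_cast by omega)]
    congr 1
    omega
  rw [PySem.List.pyGet?, h1]
  rw [List.getElem?_reverse hk]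
  rfl

lemma pySetOpt_block (d : Nat) (t : List (Option Int)) (k : Nat) (hk : t.length = k) (v : Int) :
    pySetOpt (List.replicate (d+1) none ++ t) (-((k : Int)+1)) v
      = List.replicate d none ++ some v :: t := by
  have hlen : (List.replicate (d+1) (none : Option Int) ++ t).length = d + 1 + k := by
    simp [hk]
  have h1 : PySem.List.pyIdx? (List.replicate (d+1) (none : Option Int) ++ t).length (-((k : Int)+1))
      = some d := by
    rw [hlen]
    simp only [PySem.List.pyIdx?]
    rw [if_neg (by omega), if_pos (by exact_mod_cast by omega)]
    congr 1
    omega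
  rw [pySetOpt, h1]
  exact set_replicate_cons d none (some v) t

-- loop invariant of A's index loop: the remaining range computes runA on the remaining reversed suffix
lemma foldA_inv (xs : List Int) : ∀ (d k : Nat), k + d = xs.length →
    ∀ (a : Bool) (t : List (Option Int)), t.length = k →
    (PySem.List.pyRange (k : Int) (xs.length : Int) 1).foldl (upStep xs)
      (a, List.replicate d none ++ t)
    = ((runA a (xs.reverse.drop k)).1, (runA a (xs.reverse.drop k)).2.reverse ++ t) := by
  intro d
  induction d with
  | zero =>
    intro k hk a t ht
    rw [PySem.List.pyRange_one_eq_nil (by omega)]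
    have h2 : xs.reverse.drop k = [] := by
      apply List.drop_eq_nil_of_le; simp; omega
    simp [h2, runA]
  | succ d ih =>
    intro k hk a t ht
    have hklt : k < xs.length := by omega
    have hklt' : k < xs.reverse.length := by simpa using hklt
    rw [PySem.List.pyRange_one_cons (by exact_mod_cast hklt), List.foldl_cons]
    have hdrop : xs.reverse.drop k = xs.reverse[k] :: xs.reverse.drop (k+1) :=
      List.drop_eq_getElem_cons hklt'
    have hget : (PySem.List.pyGet? xs (-((k : Int)+1))).getD 0 = xs.reverse[k] := by
      rw [pyGet?_neg xs k hklt]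
      simp [List.getElem?_eq_getElem hklt']
    have hcast : ((k : Int) + 1) = ((k + 1 : Nat) : Int) := by push_cast; ring
    set b := xs.reverse[k] with hb
    by_cases ha : a
    · by_cases hb1 : b = 1
      · rw [show upStep xs (a, List.replicate (d+1) none ++ t) (k : Int)
              = (true, List.replicate d none ++ some 0 :: t) by
            simp only [upStep, ha, hget, hb1]
            rw [pySetOpt_block d t k ht 0]
            simp]
        rw [hcast, ih (k+1) (by omega) true (some 0 :: t) (by simp [ht])]
        simp [hdrop, runA, hb1, ha]
      · by_cases hb0 : b = 0
        · rw [show upStep xs (a, List.replicate (d+1) none ++ t) (k : Int)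
                = (false, List.replicate d none ++ some 1 :: t) by
              simp only [upStep, ha, hget, hb0]
              rw [pySetOpt_block d t k ht 1]
              simp]
          rw [hcast, ih (k+1) (by omega) false (some 1 :: t) (by simp [ht])]
          simp [hdrop, runA, hb0, ha]
        · rw [show upStep xs (a, List.replicate (d+1) none ++ t) (k : Int)
                = (true, List.replicate d none ++ none :: t) by
              simp only [upStep, ha, hget]
              simp [hb1, hb0, List.replicate_succ']]
          rw [hcast, ih (k+1) (by omega) true (none :: t) (by simp [ht])]
          simp [hdrop, runA, hb1, hb0, ha]
    · rw [show upStep xs (a, List.replicate (d+1) none ++ t) (k : Int)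
            = (false, List.replicate d none ++ some b :: t) by
          simp only [upStep, hget]
          rw [pySetOpt_block d t k ht b]
          simp [ha]]
      rw [hcast, ih (k+1) (by omega) false (some b :: t) (by simp [ht])]
      simp [hdrop, runA, ha]

-- binary_up_one, when its all-ones branch is not taken, computes the add pass LSB-first
lemma up_eq (xs : List Int) (h : ¬ xs.all (fun b => b == 1)) :
    binary_up_one xs = (0, ((runA true xs.reverse).2.reverse).map (fun o => o.getD 0)) := by
  unfold binary_up_one
  rw [if_neg h]
  have h0 : ((0 : Nat) : Int) = 0 := by norm_num
  have h2 := foldA_inv xs xs.length 0 (by omega) true [] rfl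
  rw [h0] at h2
  simp only [List.append_nil, List.drop_zero] at h2
  show (0, List.map (fun o => o.getD 0)
      ((PySem.List.pyRange 0 (xs.length : Int) 1).foldl (upStep xs)
        (true, List.replicate xs.length none)).2) = _
  rw [h2]

-- runA on flipped inputs whose LSB-first form is j ones then a 0 (bits: j zeros then a 1)
lemma runA_shape (j : Nat) (ws : List Int) :
    runA true (List.replicate j 1 ++ 0 :: ws)
      = (false, List.replicate j (some 0) ++ some 1 :: ws.map some) := by
  induction j with
  | zero =>
    simp [runA]
    induction ws with
    | nil => simp [runA]
    | cons w ws ihw => simp [runA, ihw]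
  | succ j ih => simp [List.replicate_succ, runA, ih]

lemma run_shape (j : Nat) (ws : List Int) :
    run true (List.replicate j 0 ++ 1 :: ws)
      = (false, List.replicate j 1 ++ 0 :: ws) := by
  induction j with
  | zero =>
    simp [run]
    induction ws with
    | nil => simp [run]
    | cons w ws ihw => simp [run, ihw]
  | succ j ih => simp [List.replicate_succ, run, ih]

lemma run_zeros (n : Nat) : run true (List.replicate n 0) = (true, List.replicate n 1) := by
  induction n with
  | zero => simp [run]
  | succ n ih => simp [List.replicate_succ, run, ih]

-- ===== VERDICT (by name: the statement is the Claim_ definition above) =====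
theorem binary_down_one_spec : Claim_equal_binary_down_one := by
  intro bits _ hpre
  unfold Spec_binary_down_one
  by_cases hz : bits.all (fun b => b == 0)
  · -- all-zero (or empty) case
    have hrep : bits = List.replicate bits.length 0 := by
      apply List.eq_replicate_of_mem
      intro b hb
      have := List.all_eq_true.mp hz b hb
      simpa using this
    rw [alt_eq, binary_down_one, if_pos hz]
    conv_rhs => rw [hrep]
    rw [List.reverse_replicate, run_zeros]
    simp
  · -- there is a nonzero element; by Pre_, the least-significant one is 1
    -- decompose bits.reverse = replicate j 0 ++ 1 :: rest
    have hsplit : bits.reverse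
        = bits.reverse.takeWhile (fun b => b == 0) ++ bits.reverse.dropWhile (fun b => b == 0) :=
      (List.takeWhile_append_dropWhile).symm
    set tw := bits.reverse.takeWhile (fun b => b == 0) with htw
    set dw := bits.reverse.dropWhile (fun b => b == 0) with hdw
    have hdw_ne : dw ≠ [] := by
      intro hnil
      apply hz
      rw [List.all_eq_true]
      intro b hb
      have hbrev : b ∈ bits.reverse := by simpa using hb
      rw [hsplit, hnil, List.append_nil] at hbrev
      exact List.mem_takeWhile_imp (p := fun b => b == 0) hbrev
    obtain ⟨c, rest, hcr⟩ := List.exists_cons_of_ne_nil hdw_ne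
    have hc1 : c = 1 := by
      unfold Pre_binary_down_one at hpre
      rw [← hdw, hcr] at hpre
      simpa using hpre
    have htw_rep : tw = List.replicate tw.length 0 := by
      apply List.eq_replicate_of_mem
      intro b hb
      rw [htw] at hb
      have := List.mem_takeWhile_imp hb
      simpa using this
    have hshape : bits.reverse = List.replicate tw.length 0 ++ 1 :: rest := by
      rw [hsplit, hcr, hc1, ← htw_rep]
    -- A's side
    have hfliprev : (flip_bits bits).reverse
        = List.replicate tw.length 1 ++ 0 :: rest.map (fun b => 1 - b) := by
      rw [flip_bits, ← List.map_reverse, hshape]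
      simp
    have hnot1 : ¬ (flip_bits bits).all (fun b => b == 1) := by
      intro hall
      have h0mem : (0 : Int) ∈ (flip_bits bits).reverse := by
        rw [hfliprev]; simp
      have := List.all_eq_true.mp hall 0 (by simpa using h0mem)
      simp at this
    rw [binary_down_one, if_neg hz]
    rw [up_eq (flip_bits bits) hnot1]
    rw [hfliprev, runA_shape]
    -- B's side
    rw [alt_eq, hshape, run_shape]
    simp [flip_bits, Function.comp_def]
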